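-- pv_equiv track=rewrite | github.com/antonij-tracium/tracium-python | src/tracium/instrumentation/auto_trace_tracker.py | _find_endpoint_handler
-- ===== SOURCE A (Python) =====
-- _WEB_FRAMEWORK_PATTERNS = {
--     "flask": ["route", "view_function", "dispatch_request"],
--     "fastapi": ["endpoint", "dependant", "run_endpoint_function"],
--     "django": ["view", "dispatch", "get_response"],
--     "aiohttp": ["handler", "_handle"],
--     "sanic": ["handle_request", "router"],
-- }
--
-- def _is_web_framework_internal(func_name: str, file_path: str) -> bool:
--     """Check if a frame is internal web framework code."""
--     func_lower = func_name.lower()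
--
--     for framework, patterns in _WEB_FRAMEWORK_PATTERNS.items():
--         if framework in file_path.lower():
--             return any(pattern in func_lower for pattern in patterns)
--
--     return False
--
-- def _find_endpoint_handler(user_frames: list[tuple]) -> tuple[str, str, str] | None:
--     """
--     Find the actual endpoint handler in web frameworks.
--     Returns:
--         tuple: (function_name, file_path, frame_key) or None
--     """
--     found_framework = False
--
--     for i, (func_name, file_path, line_no, _) in enumerate(user_frames):
--         is_framework = _is_web_framework_internal(func_name, file_path)
--
--         if is_framework:
--             found_framework = True
--             continue
--
--         if found_framework:
--             frame_key = f"{file_path}:{func_name}:{line_no}"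
--             return func_name, file_path, frame_key
--
--     return None
-- ===== SOURCE B (Python) =====
-- _WEB_FRAMEWORK_PATTERNS = {
--     "flask": ["route", "view_function", "dispatch_request"],
--     "fastapi": ["endpoint", "dependant", "run_endpoint_function"],
--     "django": ["view", "dispatch", "get_response"],
--     "aiohttp": ["handler", "_handle"],
--     "sanic": ["handle_request", "router"],
-- }
--
--
-- def _is_web_framework_internal(func_name: str, file_path: str) -> bool:
--     """First framework whose name occurs in the path decides; none -> False."""
--     func_lower = func_name.lower()
--     path_lower = file_path.lower()
--     patterns = next((pats for fw, pats in _WEB_FRAMEWORK_PATTERNS.items()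
--                      if fw in path_lower), None)
--     return patterns is not None and any(p in func_lower for p in patterns)
--
--
-- def _find_endpoint_handler(user_frames: list[tuple]) -> tuple[str, str, str] | None:
--     # Pass 1: locate the first web-framework-internal frame.
--     idx = next((i for i, frame in enumerate(user_frames)
--                 if _is_web_framework_internal(frame[0], frame[1])), None)
--     if idx is None:
--         return None
--     # Pass 2: first non-framework frame strictly after that boundary.
--     for func_name, file_path, line_no, _ in user_frames[idx + 1:]:
--         if not _is_web_framework_internal(func_name, file_path):
--             return func_name, file_path, f"{file_path}:{func_name}:{line_no}"
--     return None
-- ===== Notes on version B (the rewrite author's own statement) =====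
-- stated objective: alternative
-- what changed: Replaces A's single flag-guarded scan with a two-pass decomposition: first find the index of the earliest framework-internal frame, then search only the frames strictly after it for the first non-framework frame; the helper is likewise restated as a first-match lookup over the pattern table instead of an early-return loop.
import Mathlib
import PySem

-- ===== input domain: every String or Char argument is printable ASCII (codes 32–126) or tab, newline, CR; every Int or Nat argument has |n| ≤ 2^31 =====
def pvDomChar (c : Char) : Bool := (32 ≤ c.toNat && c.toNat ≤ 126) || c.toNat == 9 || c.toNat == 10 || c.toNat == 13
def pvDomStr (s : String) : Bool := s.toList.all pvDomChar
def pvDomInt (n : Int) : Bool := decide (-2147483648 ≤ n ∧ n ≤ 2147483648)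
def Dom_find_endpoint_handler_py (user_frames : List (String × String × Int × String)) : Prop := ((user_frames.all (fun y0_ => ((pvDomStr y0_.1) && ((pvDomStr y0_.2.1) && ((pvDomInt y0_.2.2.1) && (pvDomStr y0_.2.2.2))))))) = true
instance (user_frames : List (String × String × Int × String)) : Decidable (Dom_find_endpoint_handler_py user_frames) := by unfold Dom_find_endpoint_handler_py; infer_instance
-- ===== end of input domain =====

-- B replaces A's flag-guarded single scan with a two-pass decomposition (locate the first
-- framework frame, then find the first non-framework frame after it); same cost, return value only.

-- ===== PORT A =====
def webFrameworkPatterns : List (String × List String) :=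
  [("flask", ["route", "view_function", "dispatch_request"]),
   ("fastapi", ["endpoint", "dependant", "run_endpoint_function"]),
   ("django", ["view", "dispatch", "get_response"]),
   ("aiohttp", ["handler", "_handle"]),
   ("sanic", ["handle_request", "router"])]

-- A's helper: early-return loop over the pattern table.
def isWebInternalLoop (funcLower fileLower : String) : List (String × List String) → Bool
  | [] => false
  | (fw, pats) :: rest =>
    if PySem.Str.isIn fw fileLower then
      pats.any (fun p => PySem.Str.isIn p funcLower)
    else isWebInternalLoop funcLower fileLower rest

def isWebFrameworkInternal (funcName filePath : String) : Bool :=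
  isWebInternalLoop (PySem.Str.lower funcName) (PySem.Str.lower filePath) webFrameworkPatterns

-- A's main loop: flag `foundFramework` threaded through a single scan.
def findHandlerLoop (found : Bool) : List (String × String × Int × String) → Option (String × String × String)
  | [] => none
  | (funcName, filePath, lineNo, _) :: rest =>
    if isWebFrameworkInternal funcName filePath then
      findHandlerLoop true rest
    else if found then
      some (funcName, filePath, PySem.Str.join ":" [filePath, funcName, PySem.Int.toStr lineNo])
    else
      findHandlerLoop found rest

def find_endpoint_handler_py (user_frames : List (String × String × Int × String)) : Option (String × String × String) :=
  findHandlerLoop false user_frames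

-- ===== PORT B =====
-- B's helper: first framework whose name occurs in the path (first-match lookup), then the pattern test.
def isWebFrameworkInternalB (funcName filePath : String) : Bool :=
  let funcLower := PySem.Str.lower funcName
  let pathLower := PySem.Str.lower filePath
  match webFrameworkPatterns.find? (fun kv => PySem.Str.isIn kv.1 pathLower) with
  | none => false
  | some (_, pats) => pats.any (fun p => PySem.Str.isIn p funcLower)

def find_endpoint_handler_py_alt (user_frames : List (String × String × Int × String)) : Option (String × String × String) :=
  -- pass 1: index of the first framework-internal frame (Python: next(... enumerate ...))
  match user_frames.findIdx? (fun f => isWebFrameworkInternalB f.1 f.2.1) with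
  | none => none
  | some idx =>
    -- pass 2: first non-framework frame in user_frames[idx+1:] (nonnegative slice = drop)
    match (user_frames.drop (idx + 1)).find? (fun f => !(isWebFrameworkInternalB f.1 f.2.1)) with
    | none => none
    | some (funcName, filePath, lineNo, _) =>
      some (funcName, filePath, PySem.Str.join ":" [filePath, funcName, PySem.Int.toStr lineNo])

-- ===== PRECONDITION & SPEC =====
def Spec_find_endpoint_handler_py (user_frames : List (String × String × Int × String)) (out : Option (String × String × String)) : Prop := out = find_endpoint_handler_py_alt user_frames
instance (user_frames : List (String × String × Int × String)) (out : Option (String × String × String)) : Decidable (Spec_find_endpoint_handler_py user_frames out) := by unfold Spec_find_endpoint_handler_py; infer_instance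

-- ===== CLAIM (what is proved, stated in full; the proofs are below) =====
def Claim_equal_find_endpoint_handler_py : Prop := ∀ (user_frames : List (String × String × Int × String)), Dom_find_endpoint_handler_py user_frames → Spec_find_endpoint_handler_py user_frames (find_endpoint_handler_py user_frames)

-- ===== LEMMAS AND PROOFS =====

-- The two helpers agree: first-match lookup = early-return loop over the pattern table.
theorem helper_eq (fn fp : String) : isWebFrameworkInternalB fn fp = isWebFrameworkInternal fn fp := by
  unfold isWebFrameworkInternalB isWebFrameworkInternal webFrameworkPatterns
  simp only [List.find?, isWebInternalLoop]
  split_ifs <;> simp_all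

theorem helper_funext :
    (fun f : String × String × Int × String => isWebFrameworkInternalB f.1 f.2.1)
      = (fun f => isWebFrameworkInternal f.1 f.2.1) :=
  funext fun f => helper_eq f.1 f.2.1

theorem helper_funext_not :
    (fun f : String × String × Int × String => !(isWebFrameworkInternalB f.1 f.2.1))
      = (fun f => !(isWebFrameworkInternal f.1 f.2.1)) :=
  funext fun f => by rw [helper_eq]

-- A's loop with the flag set = B's second pass.
theorem loop_true_eq (xs : List (String × String × Int × String)) :
    findHandlerLoop true xs =
      match xs.find? (fun f => !(isWebFrameworkInternal f.1 f.2.1)) with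
      | none => none
      | some (funcName, filePath, lineNo, _) =>
        some (funcName, filePath, PySem.Str.join ":" [filePath, funcName, PySem.Int.toStr lineNo]) := by
  induction xs with
  | nil => rfl
  | cons f rest ih =>
    obtain ⟨fn, fp, ln, x⟩ := f
    simp only [findHandlerLoop, List.find?]
    by_cases h : isWebFrameworkInternal fn fp <;> simp [h, ih]

-- A's loop with the flag clear = B's whole two-pass algorithm (with A's helper substituted).
theorem loop_false_eq (xs : List (String × String × Int × String)) :
    findHandlerLoop false xs =
      match xs.findIdx? (fun f => isWebFrameworkInternal f.1 f.2.1) with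
      | none => none
      | some idx =>
        match (xs.drop (idx + 1)).find? (fun f => !(isWebFrameworkInternal f.1 f.2.1)) with
        | none => none
        | some (funcName, filePath, lineNo, _) =>
          some (funcName, filePath, PySem.Str.join ":" [filePath, funcName, PySem.Int.toStr lineNo]) := by
  induction xs with
  | nil => rfl
  | cons f rest ih =>
    obtain ⟨fn, fp, ln, x⟩ := f
    by_cases h : isWebFrameworkInternal fn fp
    · simp only [findHandlerLoop, List.findIdx?_cons, h, if_true,
        List.drop_succ_cons, List.drop_zero]
      exact loop_true_eq rest
    · simp only [findHandlerLoop, Bool.false_eq_true, if_false,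
        List.findIdx?_cons, h, ih]
      cases hidx : rest.findIdx? (fun f => isWebFrameworkInternal f.1 f.2.1) <;>
        simp

-- ===== VERDICT (by name: the statement is the Claim_ definition above) =====
theorem find_endpoint_handler_py_spec : Claim_equal_find_endpoint_handler_py := by
  intro uf _
  unfold Spec_find_endpoint_handler_py find_endpoint_handler_py find_endpoint_handler_py_alt
  rw [helper_funext, helper_funext_not]
  exact loop_false_eq uf
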